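-- pv_equiv track=rewrite | github.com/d2xi/codility_ | L12.1/ChocolatesByNumbers_naive.py | getNumberChocolatesEaten
-- ===== SOURCE A (Python) =====
-- def getNumberChocolatesEaten(totalNumChocolates, skipCount):
--     eatenCount = 0
--     wrappers = []
--     currPos = 0
--     while(True):
--         if (currPos not in wrappers):
--             eatenCount = eatenCount + 1
--             wrappers.append(currPos)
--         else:
--             return eatenCount
--         currPos = (currPos + skipCount) % totalNumChocolates
-- ===== SOURCE B (Python) =====
-- def getNumberChocolatesEaten(totalNumChocolates, skipCount):
--     # closed form: number of distinct positions = N / gcd(N, M), via Euclid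
--     a = abs(totalNumChocolates)
--     b = abs(skipCount)
--     while b:
--         a, b = b, a % b
--     return abs(totalNumChocolates) // a
-- ===== Notes on version B (the rewrite author's own statement) =====
-- stated objective: faster
-- what changed: Replaced the O(N) simulation with O(N^2) list-membership scans by the closed form |N| // gcd(|N|, |M|) computed with Euclid's algorithm.
import Mathlib
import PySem

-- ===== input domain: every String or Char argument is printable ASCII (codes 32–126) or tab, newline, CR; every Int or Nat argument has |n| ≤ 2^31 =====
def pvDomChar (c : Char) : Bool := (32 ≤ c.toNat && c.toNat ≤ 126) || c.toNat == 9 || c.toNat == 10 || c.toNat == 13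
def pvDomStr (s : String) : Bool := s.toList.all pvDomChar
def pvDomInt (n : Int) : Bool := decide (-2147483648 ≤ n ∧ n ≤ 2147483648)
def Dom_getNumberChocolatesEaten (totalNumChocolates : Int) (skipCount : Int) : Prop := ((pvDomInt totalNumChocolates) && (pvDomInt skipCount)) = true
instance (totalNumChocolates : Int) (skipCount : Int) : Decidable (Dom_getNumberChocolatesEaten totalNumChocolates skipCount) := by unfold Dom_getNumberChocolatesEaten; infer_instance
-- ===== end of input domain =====

-- B replaces A's quadratic simulation (a list-membership scan per step) by the
-- closed form |N| // gcd(|N|, |M|) computed with Euclid's algorithm.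

-- ===== PORT A =====
-- A's unbounded `while True` loop; the fuel (|N| + 1) is only a totality guard:
-- under Pre_ (N ≠ 0) the loop returns before the fuel runs out.
def pvLoopA (N M : Int) : Nat → Int → List Int → Int → Int
  | 0, _, _, _ => 0
  | fuel + 1, eaten, wrappers, curr =>
    if curr ∉ wrappers then
      pvLoopA N M fuel (eaten + 1) (wrappers ++ [curr]) (PySem.Int.mod (curr + M) N)
    else
      eaten

def getNumberChocolatesEaten (totalNumChocolates : Int) (skipCount : Int) : Int :=
  pvLoopA totalNumChocolates skipCount (totalNumChocolates.natAbs + 1) 0 [] 0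

-- ===== PORT B =====
-- Source B's `while b: a, b = b, a % b` on the two absolute values (both ≥ 0, so
-- Nat % and Nat / are exact for Python's % and //). The fuel (b + 1) is only a
-- structural-recursion guard: b strictly decreases, so it never runs out.
def pvEuclidFuel : Nat → Nat → Nat → Nat
  | 0, a, _ => a
  | fuel + 1, a, b => if b = 0 then a else pvEuclidFuel fuel b (a % b)

def pvEuclid (a b : Nat) : Nat := pvEuclidFuel (b + 1) a b

def getNumberChocolatesEaten_alt (totalNumChocolates : Int) (skipCount : Int) : Int :=
  ((totalNumChocolates.natAbs / pvEuclid totalNumChocolates.natAbs skipCount.natAbs : Nat) : Int)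

-- ===== PRECONDITION & SPEC =====
-- Pre_ excludes totalNumChocolates = 0, where A raises ZeroDivisionError at the first modulo.
def Pre_getNumberChocolatesEaten (totalNumChocolates : Int) (skipCount : Int) : Prop :=
  totalNumChocolates ≠ 0
instance (totalNumChocolates : Int) (skipCount : Int) : Decidable (Pre_getNumberChocolatesEaten totalNumChocolates skipCount) := by unfold Pre_getNumberChocolatesEaten; infer_instance

def pvWitness_getNumberChocolatesEaten : Int × Int := (10, 4)

def Spec_getNumberChocolatesEaten (totalNumChocolates : Int) (skipCount : Int) (out : Int) : Prop := out = getNumberChocolatesEaten_alt totalNumChocolates skipCount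
instance (totalNumChocolates : Int) (skipCount : Int) (out : Int) : Decidable (Spec_getNumberChocolatesEaten totalNumChocolates skipCount out) := by unfold Spec_getNumberChocolatesEaten; infer_instance

-- ===== CLAIM (what is proved, stated in full; the proofs are below) =====
def Claim_equal_getNumberChocolatesEaten : Prop := ∀ (totalNumChocolates : Int) (skipCount : Int), Dom_getNumberChocolatesEaten totalNumChocolates skipCount → Pre_getNumberChocolatesEaten totalNumChocolates skipCount → Spec_getNumberChocolatesEaten totalNumChocolates skipCount (getNumberChocolatesEaten totalNumChocolates skipCount)

-- ===== LEMMAS AND PROOFS =====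

-- B's hand-written Euclid computes Nat.gcd (enough fuel: b < fuel).
theorem pvEuclidFuel_eq_gcd : ∀ (fuel a b : Nat), b < fuel → pvEuclidFuel fuel a b = Nat.gcd a b := by
  intro fuel
  induction fuel with
  | zero => intro a b h; omega
  | succ fuel ih =>
    intro a b h
    rcases Nat.eq_zero_or_pos b with hb | hb
    · subst hb; simp [pvEuclidFuel]
    · rw [pvEuclidFuel, if_neg (by omega),
        ih b (a % b) (by have := Nat.mod_lt a hb; omega),
        Nat.gcd_comm b, ← Nat.gcd_rec, Nat.gcd_comm]

theorem pvEuclid_eq_gcd (a b : Nat) : pvEuclid a b = Nat.gcd a b :=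
  pvEuclidFuel_eq_gcd (b + 1) a b (Nat.lt_succ_self b)

-- Python mod values agree iff the arguments are congruent modulo the divisor.
theorem pymod_eq_iff (N x y : Int) (hN : N ≠ 0) :
    PySem.Int.mod x N = PySem.Int.mod y N ↔ N ∣ (x - y) := by
  have hx := PySem.Int.floordiv_mul_add_mod x N
  have hy := PySem.Int.floordiv_mul_add_mod y N
  constructor
  · intro h
    exact ⟨PySem.Int.floordiv x N - PySem.Int.floordiv y N, by linear_combination -hx + hy + h⟩
  · rintro ⟨k, hk⟩
    have hbound : |PySem.Int.mod x N - PySem.Int.mod y N| < |N| := by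
      rcases lt_or_gt_of_ne hN with hneg | hpos
      · have b1 := PySem.Int.mod_neg_bounds (a := x) hneg
        have b2 := PySem.Int.mod_neg_bounds (a := y) hneg
        rw [abs_of_neg hneg, abs_lt]; omega
      · have b1 := PySem.Int.mod_nonneg (a := x) hpos
        have b2 := PySem.Int.mod_nonneg (a := y) hpos
        have c1 := PySem.Int.mod_lt (a := x) hpos
        have c2 := PySem.Int.mod_lt (a := y) hpos
        rw [abs_of_pos hpos, abs_lt]; omega
    have hdvd : |N| ∣ (PySem.Int.mod x N - PySem.Int.mod y N) := by
      rw [abs_dvd]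
      exact ⟨k - PySem.Int.floordiv x N + PySem.Int.floordiv y N,
        by linear_combination hk + hx - hy⟩
    have := Int.eq_zero_of_abs_lt_dvd hdvd hbound
    omega

-- The position after k steps of A's loop.
def pvPos (N M : Int) (k : Nat) : Int := PySem.Int.mod ((k : Int) * M) N

theorem pvPos_zero (N M : Int) : pvPos N M 0 = 0 := by
  have h0 : PySem.Int.mod 0 N = 0 := (PySem.Int.mod_eq_zero_iff_dvd 0 N).mpr (dvd_zero N)
  simpa [pvPos] using h0

theorem pvPos_step (N M : Int) (k : Nat) (hN : N ≠ 0) :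
    PySem.Int.mod (pvPos N M k + M) N = pvPos N M (k + 1) := by
  apply (pymod_eq_iff N _ _ hN).mpr
  have h := PySem.Int.floordiv_mul_add_mod ((k : Int) * M) N
  refine ⟨-(PySem.Int.floordiv ((k : Int) * M) N), ?_⟩
  simp only [pvPos]
  push_cast
  linear_combination h

-- Cancellation behind the divisibility transfer, stated over Nat with the
-- gcd factorisations as hypotheses.
theorem nat_dvd_iff_len : ∀ (n m d g L m' : Nat), 0 < g → n = g * L → m = g * m' →
    Nat.Coprime L m' → (n ∣ d * m ↔ L ∣ d) := by
  rintro n m d g L m' hg rfl rfl hcop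
  constructor
  · intro h
    have h2 : g * L ∣ g * (d * m') := by
      have : d * (g * m') = g * (d * m') := by ring
      rwa [this] at h
    exact hcop.dvd_of_dvd_mul_right ((Nat.mul_dvd_mul_iff_left hg).mp h2)
  · rintro ⟨t, rfl⟩
    exact ⟨t * m', by ring⟩

-- Divisibility transfer: with n = |N|, m = |M|, g = gcd n m,
-- N divides d * M (d : Nat) iff (n / g) divides d.
theorem dvd_iff_len (N M : Int) (hN : N ≠ 0) (d : Nat) :
    N ∣ ((d : Int) * M) ↔ (N.natAbs / Nat.gcd N.natAbs M.natAbs) ∣ d := by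
  have hnpos : 0 < N.natAbs := Int.natAbs_pos.mpr hN
  have hgpos : 0 < Nat.gcd N.natAbs M.natAbs := Nat.gcd_pos_of_pos_left _ hnpos
  have h1 : N ∣ ((d : Int) * M) ↔ N.natAbs ∣ d * M.natAbs := by
    rw [← Int.natAbs_dvd, ← Int.dvd_natAbs, Int.natAbs_mul, Int.natAbs_natCast]
    exact_mod_cast Iff.rfl
  rw [h1]
  obtain ⟨L, hL⟩ := Nat.gcd_dvd_left N.natAbs M.natAbs
  obtain ⟨m', hm'⟩ := Nat.gcd_dvd_right N.natAbs M.natAbs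
  have hndg : N.natAbs / Nat.gcd N.natAbs M.natAbs = L :=
    Nat.div_eq_of_eq_mul_right hgpos hL
  have hmdg : M.natAbs / Nat.gcd N.natAbs M.natAbs = m' :=
    Nat.div_eq_of_eq_mul_right hgpos hm'
  have hcop : Nat.Coprime L m' := by
    have := Nat.coprime_div_gcd_div_gcd (m := N.natAbs) (n := M.natAbs) hgpos
    rwa [hndg, hmdg] at this
  rw [hndg]
  exact nat_dvd_iff_len _ _ d _ L m' hgpos hL hm' hcop

-- Positions agree iff the step counts are congruent modulo L = n / g.
theorem pvPos_eq_iff (N M : Int) (hN : N ≠ 0) (i j : Nat) (hij : j ≤ i) :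
    pvPos N M i = pvPos N M j ↔ (N.natAbs / Nat.gcd N.natAbs M.natAbs) ∣ (i - j) := by
  rw [pvPos, pvPos, pymod_eq_iff _ _ _ hN]
  have : (i : Int) * M - (j : Int) * M = ((i - j : Nat) : Int) * M := by
    push_cast [hij]; ring
  rw [this, dvd_iff_len N M hN]

-- The main loop invariant: starting at step k ≤ L with the k visited positions
-- recorded in order, A's loop returns L.
theorem pvLoopA_run (N M : Int) (hN : N ≠ 0) (L : Nat)
    (hLdef : L = N.natAbs / Nat.gcd N.natAbs M.natAbs) :
    ∀ (fuel k : Nat), k ≤ L → L - k < fuel →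
      pvLoopA N M fuel (k : Int) ((List.range k).map (pvPos N M)) (pvPos N M k) = (L : Int) := by
  have hnpos : 0 < N.natAbs := Int.natAbs_pos.mpr hN
  have hLpos : 0 < L := by
    rw [hLdef]
    exact Nat.div_pos (Nat.le_of_dvd hnpos (Nat.gcd_dvd_left _ _))
      (Nat.gcd_pos_of_pos_left _ hnpos)
  intro fuel
  induction fuel with
  | zero => intro k _ h; omega
  | succ fuel ih =>
    intro k hk hfuel
    rcases eq_or_lt_of_le hk with heq | hlt
    · -- k = L : the position repeats (pvPos L = pvPos 0), the loop returns eaten = k = L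
      subst heq
      have hmem : pvPos N M k ∈ (List.range k).map (pvPos N M) := by
        refine List.mem_map.mpr ⟨0, List.mem_range.mpr hLpos, ?_⟩
        exact ((pvPos_eq_iff N M hN k 0 (Nat.zero_le k)).mpr (by rw [← hLdef]; simp)).symm
      rw [pvLoopA, if_neg (not_not_intro hmem)]
    · -- k < L : the position is new, take one more step
      have hnotmem : pvPos N M k ∉ (List.range k).map (pvPos N M) := by
        intro hmem
        rcases List.mem_map.mp hmem with ⟨i, hi, hpi⟩
        have hiK : i < k := List.mem_range.mp hi
        have hdvd := (pvPos_eq_iff N M hN k i (Nat.le_of_lt hiK)).mp hpi.symm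
        rw [← hLdef] at hdvd
        have := Nat.le_of_dvd (by omega) hdvd
        omega
      rw [pvLoopA, if_pos hnotmem, pvPos_step N M k hN]
      have hw : (List.range k).map (pvPos N M) ++ [pvPos N M k]
          = (List.range (k + 1)).map (pvPos N M) := by
        rw [List.range_succ, List.map_append]; rfl
      have hc : (k : Int) + 1 = ((k + 1 : Nat) : Int) := by push_cast; ring
      rw [hw, hc]
      exact ih (k + 1) hlt (by omega)

-- ===== VERDICT (by name: the statement is the Claim_ definition above) =====
theorem getNumberChocolatesEaten_spec : Claim_equal_getNumberChocolatesEaten := by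
  intro N M _ hPre
  unfold Spec_getNumberChocolatesEaten getNumberChocolatesEaten getNumberChocolatesEaten_alt
  have hL : N.natAbs / Nat.gcd N.natAbs M.natAbs ≤ N.natAbs := Nat.div_le_self _ _
  have hrun := pvLoopA_run N M hPre _ rfl (N.natAbs + 1) 0 (Nat.zero_le _) (by omega)
  simp only [List.range_zero, List.map_nil, Nat.cast_zero] at hrun
  rw [pvPos_zero] at hrun
  rw [hrun, pvEuclid_eq_gcd]
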